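-- pv_equiv track=rewrite | github.com/maxmalkin/slack-wordle | app/blocks.py | calculate_letter_states
-- ===== SOURCE A (Python) =====
-- from typing import List, Dict
--
-- def calculate_letter_states(guesses: List[str], feedback: List[List[str]]) -> Dict[str, str]:
--     letter_states = {}
--
--     for i, guess in enumerate(guesses):
--         for j, letter in enumerate(guess.lower()):
--             current_state = feedback[i][j]
--             existing_state = letter_states.get(letter, "unused")
--
--             if current_state == "correct":
--                 letter_states[letter] = "correct"
--             elif current_state == "present" and existing_state != "correct":
--                 letter_states[letter] = "present"
--             elif letter not in letter_states:
--                 letter_states[letter] = "absent"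
--
--     return letter_states
-- ===== SOURCE B (Python) =====
-- def calculate_letter_states(guesses, feedback):
--     # Flatten into (letter, state) pairs, then aggregate per letter:
--     # a letter is "correct" if any of its feedbacks is, else "present" if any is, else "absent".
--     pairs = [
--         (letter, feedback[i][j])
--         for i, guess in enumerate(guesses)
--         for j, letter in enumerate(guess.lower())
--     ]
--     result = {}
--     for letter, _ in pairs:
--         if letter not in result:
--             states = [s for l2, s in pairs if l2 == letter]
--             if "correct" in states:
--                 result[letter] = "correct"
--             elif "present" in states:
--                 result[letter] = "present"
--             else:
--                 result[letter] = "absent"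
--     return result
-- ===== Notes on version B (the rewrite author's own statement) =====
-- stated objective: alternative
-- what changed: A threads a mutable dict through nested loops, updating each letter's state transition-by-transition; B flattens guesses+feedback into (letter,state) pairs once and then, per first occurrence of each letter, aggregates ALL of that letter's states at once by priority (correct > present > absent), so no stateful upgrade logic remains.
import Mathlib
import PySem

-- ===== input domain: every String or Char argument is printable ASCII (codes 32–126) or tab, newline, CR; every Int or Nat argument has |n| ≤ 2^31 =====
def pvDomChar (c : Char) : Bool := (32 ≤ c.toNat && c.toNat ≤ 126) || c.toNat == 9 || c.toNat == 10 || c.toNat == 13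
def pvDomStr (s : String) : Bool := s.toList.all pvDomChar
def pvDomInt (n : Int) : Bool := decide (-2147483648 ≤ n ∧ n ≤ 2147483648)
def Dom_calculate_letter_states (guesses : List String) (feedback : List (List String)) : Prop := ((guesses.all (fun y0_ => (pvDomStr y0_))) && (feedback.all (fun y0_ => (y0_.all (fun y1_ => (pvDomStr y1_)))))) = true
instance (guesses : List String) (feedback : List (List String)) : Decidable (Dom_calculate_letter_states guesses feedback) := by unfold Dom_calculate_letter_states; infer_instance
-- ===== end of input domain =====

-- B differs from A by decomposition: A threads a mutable dict through the nested loops, upgrading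
-- each letter's state step by step; B flattens everything into (letter, state) pairs once and, at each
-- letter's first occurrence, aggregates all of that letter's states at once by priority.

-- ===== PORT A =====
def calculate_letter_states (guesses : List String) (feedback : List (List String)) : List (String × String) :=
  ((PySem.List.enumerate guesses).foldl (fun d pi =>
      (PySem.List.enumerate (PySem.Str.lower pi.2).toList).foldl (fun d qj =>
          let current := PySem.List.pyGetD (PySem.List.pyGetD feedback pi.1 []) qj.1 ""
          let letter := String.ofList [qj.2]
          let existing := d.getD letter "unused"
          if current == "correct" then d.insert letter "correct"
          else if current == "present" && !(existing == "correct") then d.insert letter "present"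
          else if !(d.contains letter) then d.insert letter "absent"
          else d)
        d)
    (PySem.Dict.empty : PySem.Dict String String)).items

-- ===== PORT B =====
-- B-side helper: the flattened [(letter, feedback[i][j]) …] pair list (the comprehension in Source B)
def pvPairs (guesses : List String) (feedback : List (List String)) : List (String × String) :=
  (PySem.List.enumerate guesses).flatMap (fun pi =>
    (PySem.List.enumerate (PySem.Str.lower pi.2).toList).map (fun qj =>
      (String.ofList [qj.2], PySem.List.pyGetD (PySem.List.pyGetD feedback pi.1 []) qj.1 "")))

def calculate_letter_states_alt (guesses : List String) (feedback : List (List String)) : List (String × String) :=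
  let pairs := pvPairs guesses feedback
  (pairs.foldl (fun r p =>
      if r.contains p.1 then r
      else
        let states := (pairs.filter (fun q => q.1 == p.1)).map (·.2)
        if states.contains "correct" then r.insert p.1 "correct"
        else if states.contains "present" then r.insert p.1 "present"
        else r.insert p.1 "absent")
    (PySem.Dict.empty : PySem.Dict String String)).items

-- ===== PRECONDITION & SPEC =====
-- Pre_ excludes exactly the inputs on which Python A raises IndexError: a guess with no feedback row,
-- or a feedback row shorter than its guess.
def Pre_calculate_letter_states (guesses : List String) (feedback : List (List String)) : Prop :=
  guesses.length ≤ feedback.length ∧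
    ∀ p ∈ guesses.zip feedback, (PySem.Str.lower p.1).toList.length ≤ p.2.length
instance (guesses : List String) (feedback : List (List String)) : Decidable (Pre_calculate_letter_states guesses feedback) := by unfold Pre_calculate_letter_states; infer_instance

def pvWitness_calculate_letter_states : List String × List (List String) :=
  (["crane", "thAt"], [["absent", "present", "absent", "absent", "correct"], ["correct", "present", "absent", "weird"]])

def Spec_calculate_letter_states (guesses : List String) (feedback : List (List String)) (out : List (String × String)) : Prop := out = calculate_letter_states_alt guesses feedback
instance (guesses : List String) (feedback : List (List String)) (out : List (String × String)) : Decidable (Spec_calculate_letter_states guesses feedback out) := by unfold Spec_calculate_letter_states; infer_instance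

-- ===== CLAIM (what is proved, stated in full; the proofs are below) =====
def Claim_equal_calculate_letter_states : Prop := ∀ (guesses : List String) (feedback : List (List String)), Dom_calculate_letter_states guesses feedback → Pre_calculate_letter_states guesses feedback → Spec_calculate_letter_states guesses feedback (calculate_letter_states guesses feedback)

-- ===== LEMMAS AND PROOFS =====

-- A's loop body, as a step function over one flattened (letter, state) pair
def pvStepA (d : PySem.Dict String String) (p : String × String) : PySem.Dict String String :=
  if p.2 == "correct" then d.insert p.1 "correct"
  else if p.2 == "present" && !(d.getD p.1 "unused" == "correct") then d.insert p.1 "present"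
  else if !(d.contains p.1) then d.insert p.1 "absent"
  else d

-- B's loop body over one pair, with the whole pair list fixed
def pvStepB (pairs : List (String × String)) (r : PySem.Dict String String) (p : String × String) : PySem.Dict String String :=
  if r.contains p.1 then r
  else
    let states := (pairs.filter (fun q => q.1 == p.1)).map (·.2)
    if states.contains "correct" then r.insert p.1 "correct"
    else if states.contains "present" then r.insert p.1 "present"
    else r.insert p.1 "absent"

def pvStates (k : String) (t : List (String × String)) : List String :=
  (t.filter (fun q => q.1 == k)).map (·.2)

def pvComb (v : String) (sts : List String) : String :=
  if v == "correct" || sts.contains "correct" then "correct"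
  else if v == "present" || sts.contains "present" then "present"
  else v

lemma portA_eq (guesses : List String) (feedback : List (List String)) :
    calculate_letter_states guesses feedback
      = ((pvPairs guesses feedback).foldl pvStepA PySem.Dict.empty).items := by
  simp only [calculate_letter_states, pvPairs, List.foldl_flatMap, List.foldl_map, pvStepA]

lemma portB_eq (guesses : List String) (feedback : List (List String)) :
    calculate_letter_states_alt guesses feedback
      = ((pvPairs guesses feedback).foldl (pvStepB (pvPairs guesses feedback)) PySem.Dict.empty).items := rfl

-- single-step value update of A at the affected letter
def pvUpdA (v : String) (s : String) : String :=
  if s == "correct" then "correct"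
  else if s == "present" && !(v == "correct") then "present"
  else v

lemma pvComb_nil (v : String) : pvComb v [] = v := by
  simp only [pvComb, List.contains_nil, Bool.or_false]
  split_ifs with h1 h2
  · exact (eq_of_beq h1).symm
  · exact (eq_of_beq h2).symm
  · rfl

lemma pvComb_cons (v s : String) (sts : List String) :
    pvComb v (s :: sts) = pvComb (pvUpdA v s) sts := by
  simp only [pvComb, pvUpdA, List.contains_cons]
  by_cases hc : s = "correct"
  · subst hc; simp
  · by_cases hp : s = "present"
    · subst hp
      by_cases hv : v = "correct" <;> simp_all
    · simp_all [eq_false (Ne.symm hc), eq_false (Ne.symm hp)]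

lemma stepA_get_self (d : PySem.Dict String String) (k s : String) :
    (pvStepA d (k, s)).get? k = some (pvUpdA ((d.get? k).getD "absent") s) := by
  cases hd : d.get? k with
  | some v =>
    have hc : d.contains k = true := by rw [PySem.Dict.contains_eq_isSome_get?, hd]; rfl
    have hgd : d.getD k "unused" = v := by rw [PySem.Dict.getD_eq_get?_getD, hd]; rfl
    simp only [pvStepA, pvUpdA, hgd, hc, Bool.not_true, Option.getD_some]
    split_ifs <;> simp_all [PySem.Dict.get?_insert_self]
  | none =>
    have hc : d.contains k = false := by rw [PySem.Dict.contains_eq_isSome_get?, hd]; rfl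
    have hgd : d.getD k "unused" = "unused" := by rw [PySem.Dict.getD_eq_get?_getD, hd]; rfl
    simp only [pvStepA, pvUpdA, hgd, hc, Bool.not_false, Option.getD_none]
    split_ifs <;> simp_all [PySem.Dict.get?_insert_self]

lemma stepA_get_ne (d : PySem.Dict String String) (l s k : String) (h : k ≠ l) :
    (pvStepA d (l, s)).get? k = d.get? k := by
  simp only [pvStepA]
  split_ifs <;> simp [PySem.Dict.get?_insert_of_ne _ _ h]

lemma pvStates_cons (k l s : String) (t : List (String × String)) :
    pvStates k ((l, s) :: t) = if l = k then s :: pvStates k t else pvStates k t := by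
  simp only [pvStates, List.filter_cons]
  by_cases h : l = k <;> simp [h]

lemma getA (t : List (String × String)) :
    ∀ (d : PySem.Dict String String) (k : String),
      (t.foldl pvStepA d).get? k =
        match d.get? k with
        | some v => some (pvComb v (pvStates k t))
        | none => if t.any (fun p => p.1 == k) then some (pvComb "absent" (pvStates k t)) else none := by
  induction t with
  | nil =>
    intro d k
    cases hd : d.get? k <;> simp [pvStates, pvComb_nil, hd]
  | cons p t ih =>
    intro d k
    obtain ⟨l, s⟩ := p
    rw [List.foldl_cons, ih]
    by_cases hk : l = k
    · subst hk
      rw [stepA_get_self, pvStates_cons]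
      cases d.get? l <;> simp [pvComb_cons]
    · have hne : k ≠ l := fun h => hk h.symm
      rw [stepA_get_ne d l s k hne, pvStates_cons]
      have hb : (l == k) = false := by simp [hk]
      cases d.get? k <;>
        simp only [List.any_cons, hb, Bool.false_or, if_neg hk]

lemma stepB_get_self (total : List (String × String)) (r : PySem.Dict String String)
    (k s : String) :
    (pvStepB total r (k, s)).get? k =
      some (((r.get? k).getD (pvComb "absent" (pvStates k total)))) := by
  cases hr : r.get? k with
  | some v =>
    have hc : r.contains k = true := by rw [PySem.Dict.contains_eq_isSome_get?, hr]; rfl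
    simp [pvStepB, hc, hr]
  | none =>
    have hc : r.contains k = false := by rw [PySem.Dict.contains_eq_isSome_get?, hr]; rfl
    simp only [pvStepB, hc, Bool.false_eq_true, if_false, Option.getD_none]
    have hsts : ((total.filter (fun q => q.1 == k)).map (·.2)) = pvStates k total := rfl
    rw [hsts]
    simp only [pvComb]
    split_ifs <;> simp_all [PySem.Dict.get?_insert_self]

lemma stepB_get_ne (total : List (String × String)) (r : PySem.Dict String String)
    (l s k : String) (h : k ≠ l) :
    (pvStepB total r (l, s)).get? k = r.get? k := by
  simp only [pvStepB]
  split_ifs <;> simp [PySem.Dict.get?_insert_of_ne _ _ h]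

lemma getB (total t : List (String × String)) :
    ∀ (d : PySem.Dict String String) (k : String),
      (t.foldl (pvStepB total) d).get? k =
        match d.get? k with
        | some v => some v
        | none => if t.any (fun p => p.1 == k) then some (pvComb "absent" (pvStates k total)) else none := by
  induction t with
  | nil =>
    intro d k
    cases hd : d.get? k <;> simp [hd]
  | cons p t ih =>
    intro d k
    obtain ⟨l, s⟩ := p
    rw [List.foldl_cons, ih]
    by_cases hk : l = k
    · subst hk
      rw [stepB_get_self]
      cases d.get? l <;> simp
    · have hne : k ≠ l := fun h => hk h.symm
      rw [stepB_get_ne total d l s k hne]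
      have hb : (l == k) = false := by simp [hk]
      cases d.get? k <;>
        simp only [List.any_cons, hb, Bool.false_or]

lemma stepA_keys (d : PySem.Dict String String) (l s : String) :
    (pvStepA d (l, s)).keys = PySem.Set.add d.keys l := by
  by_cases hc : d.contains l = true
  · have hm : l ∈ d.keys := (PySem.Dict.contains_iff_mem_keys _ _).mp hc
    simp only [pvStepA]
    split_ifs <;>
      simp_all [PySem.Dict.keys_insert_of_contains]
  · have hc' : d.contains l = false := by simpa using hc
    have hm : l ∉ d.keys := fun h => by
      simp [(PySem.Dict.contains_iff_mem_keys _ _).mpr h] at hc'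
    simp only [pvStepA]
    split_ifs <;>
      simp_all [PySem.Dict.keys_insert_of_not_contains]

lemma stepB_keys (total : List (String × String)) (r : PySem.Dict String String) (l s : String) :
    (pvStepB total r (l, s)).keys = PySem.Set.add r.keys l := by
  by_cases hc : r.contains l = true
  · have hm : l ∈ r.keys := (PySem.Dict.contains_iff_mem_keys _ _).mp hc
    simp [pvStepB, hc, PySem.Set.add_of_mem hm]
  · have hc' : r.contains l = false := by simpa using hc
    have hm : l ∉ r.keys := fun h => by
      simp [(PySem.Dict.contains_iff_mem_keys _ _).mpr h] at hc'
    simp only [pvStepB, hc', Bool.false_eq_true, if_false]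
    split_ifs <;>
      simp_all [PySem.Dict.keys_insert_of_not_contains]

lemma keysA (t : List (String × String)) :
    ∀ (d : PySem.Dict String String),
      (t.foldl pvStepA d).keys = PySem.Set.update d.keys (t.map (·.1)) := by
  induction t with
  | nil => intro d; simp [PySem.Set.update_nil]
  | cons p t ih =>
    intro d
    obtain ⟨l, s⟩ := p
    rw [List.foldl_cons, ih, List.map_cons, PySem.Set.update_cons, stepA_keys]

lemma keysB (total t : List (String × String)) :
    ∀ (d : PySem.Dict String String),
      (t.foldl (pvStepB total) d).keys = PySem.Set.update d.keys (t.map (·.1)) := by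
  induction t with
  | nil => intro d; simp [PySem.Set.update_nil]
  | cons p t ih =>
    intro d
    obtain ⟨l, s⟩ := p
    rw [List.foldl_cons, ih, List.map_cons, PySem.Set.update_cons, stepB_keys]

-- ===== VERDICT (by name: the statement is the Claim_ definition above) =====
theorem calculate_letter_states_spec : Claim_equal_calculate_letter_states := by
  intro guesses feedback _ _
  unfold Spec_calculate_letter_states
  rw [portA_eq, portB_eq]
  set F := pvPairs guesses feedback with hF
  set dA := F.foldl pvStepA PySem.Dict.empty with hdA
  set dB := F.foldl (pvStepB F) PySem.Dict.empty with hdB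
  have hkA : dA.keys = PySem.Set.update [] (F.map (·.1)) := by
    rw [hdA, keysA]; simp [PySem.Dict.keys_empty]
  have hkB : dB.keys = PySem.Set.update [] (F.map (·.1)) := by
    rw [hdB, keysB]; simp [PySem.Dict.keys_empty]
  have hndA : dA.keys.Nodup := by rw [hkA]; exact PySem.Set.nodup_update _ _ List.nodup_nil
  have hndB : dB.keys.Nodup := by rw [hkB]; exact PySem.Set.nodup_update _ _ List.nodup_nil
  rw [PySem.Dict.items_eq_map_keys dA hndA "unused", PySem.Dict.items_eq_map_keys dB hndB "unused",
    hkA, hkB]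
  apply List.map_congr_left
  intro k hkmem
  have hkF : k ∈ F.map (·.1) := by
    have := (PySem.Set.mem_update _ _ _).mp hkmem
    simpa using this
  have hany : (F.any (fun p => p.1 == k)) = true := by
    obtain ⟨p, hp, hpk⟩ := List.mem_map.mp hkF
    exact List.any_eq_true.mpr ⟨p, hp, by simp [hpk]⟩
  have hA : dA.get? k = some (pvComb "absent" (pvStates k F)) := by
    rw [hdA, getA]; simp [PySem.Dict.get?_empty, hany]
  have hB : dB.get? k = some (pvComb "absent" (pvStates k F)) := by
    rw [hdB, getB]; simp [PySem.Dict.get?_empty, hany]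
  simp [PySem.Dict.getD_eq_get?_getD, hA, hB]
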